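-- pv_equiv track=rewrite | github.com/MD-Woron/2048_on_pygame_for_pc | main.py | compress_s
-- ===== SOURCE A (Python) =====
-- def compress_s(l):
--     l = list(reversed(l))
--     for j in range(len(l)):
--         i = 0
--         s = 0
--         while i < len(l) - s:
--             if l[i][j] == 0:
--                 k = i
--                 s += 1
--                 for k in range(k, len(l) - 1):
--                     l[k][j] = l[k + 1][j]
--                     k += 1
--                 l[-1][j] = 0
--             else:
--                 i += 1
--     l = list(reversed(l))
--     return (l)
-- ===== SOURCE B (Python) =====
-- def compress_s(l):
--     # Per-column gather: zeros first, non-zeros (in order) at the bottom.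
--     # Unlike A, does not mutate the input rows; the return value is identical.
--     n = len(l)
--     cols = []
--     for j in range(n):
--         col = [row[j] for row in l]
--         nz = [x for x in col if x != 0]
--         cols.append([0] * (n - len(nz)) + nz)
--     return [[c[i] for c in cols] + l[i][n:] for i in range(n)]
-- ===== Notes on version B (the rewrite author's own statement) =====
-- stated objective: alternative
-- what changed: Replaced A's in-place while-loop that repeatedly shifts a whole column suffix for every zero found by a per-column single gather pass (collect non-zeros in order, pad zeros in front) that rebuilds the rows; B also does not mutate the input rows.
import Mathlib
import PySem

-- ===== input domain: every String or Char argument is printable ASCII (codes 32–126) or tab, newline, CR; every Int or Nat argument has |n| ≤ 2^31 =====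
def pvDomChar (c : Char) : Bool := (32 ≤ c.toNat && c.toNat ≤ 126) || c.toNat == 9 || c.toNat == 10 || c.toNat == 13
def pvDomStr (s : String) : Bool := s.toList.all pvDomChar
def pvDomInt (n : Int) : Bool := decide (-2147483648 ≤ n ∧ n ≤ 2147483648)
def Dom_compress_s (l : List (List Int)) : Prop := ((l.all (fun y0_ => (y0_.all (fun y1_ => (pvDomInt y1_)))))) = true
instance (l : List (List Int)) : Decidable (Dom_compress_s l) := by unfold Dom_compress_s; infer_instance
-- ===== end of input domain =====

-- B replaces A's in-place per-zero column-suffix shifting inside a while loop by one gather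
-- pass per column (collect the non-zeros in order, pad zeros in front) and rebuilds the rows.
-- A mutates the input rows in place; B does not — the equivalence proved is about the RETURN value.

-- ===== PORT A =====
-- l[i][j] for indices valid under Pre_ (exact there: every index A reads is in range)
def gget (g : List (List Int)) (i j : Nat) : Int := (g.getD i []).getD j 0
-- l[i][j] = v for indices valid under Pre_ (exact there)
def sset (g : List (List Int)) (i j : Nat) (v : Int) : List (List Int) :=
  g.set i ((g.getD i []).set j v)

-- the zero case: 'for k in range(k, len(l)-1): l[k][j] = l[k+1][j]' then 'l[-1][j] = 0'
-- (l is nonempty whenever this runs, so l[-1] is l[len(l)-1])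
def shiftA (g : List (List Int)) (j i : Nat) : List (List Int) :=
  let n := g.length
  let g' := (List.range' i (n - 1 - i)).foldl (fun h k => sset h k j (gget h (k+1) j)) g
  sset g' (n - 1) j 0

theorem length_sset (g : List (List Int)) (i j : Nat) (v : Int) :
    (sset g i j v).length = g.length := by simp [sset]

theorem length_foldl_sset (j : Nat) (ks : List Nat) (g : List (List Int)) :
    (ks.foldl (fun h k => sset h k j (gget h (k+1) j)) g).length = g.length := by
  induction ks generalizing g with
  | nil => rfl
  | cons a as ih => simp [List.foldl_cons, ih, length_sset]

theorem length_shiftA (g : List (List Int)) (j i : Nat) :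
    (shiftA g j i).length = g.length := by
  simp [shiftA, length_sset, length_foldl_sset]

-- the loop 'while i < len(l) - s: …' for a fixed column j
def whileA (j : Nat) (g : List (List Int)) (i s : Nat) : List (List Int) :=
  if _h : i < g.length - s then
    if gget g i j == 0 then whileA j (shiftA g j i) i (s+1)
    else whileA j g (i+1) s
  else g
termination_by g.length - s - i
decreasing_by
  · rw [length_shiftA]; omega
  · omega

def compress_s (l : List (List Int)) : List (List Int) :=
  let l1 := l.reverse
  ((List.range l1.length).foldl (fun g j => whileA j g 0 0) l1).reverse

-- ===== PORT B =====
def compress_s_alt (l : List (List Int)) : List (List Int) :=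
  let n := l.length
  let cols := (List.range n).map (fun j =>
    let col := l.map (fun row => row.getD j 0)   -- row[j], in range under Pre_
    let nz := col.filter (fun x => x != 0)
    List.replicate (n - nz.length) 0 ++ nz)
  (List.range n).map (fun i => cols.map (fun c => c.getD i 0) ++ (l.getD i []).drop n)

-- ===== PRECONDITION & SPEC =====
-- A raises IndexError exactly when some row is shorter than the number of rows
-- (every column j < len(l) reads every row); Pre_ excludes exactly those inputs.
def Pre_compress_s (l : List (List Int)) : Prop := ∀ row ∈ l, l.length ≤ row.length
instance (l : List (List Int)) : Decidable (Pre_compress_s l) := by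
  unfold Pre_compress_s; infer_instance

def pvWitness_compress_s : List (List Int) := [[0, 2], [2, 0]]

def Spec_compress_s (l : List (List Int)) (out : List (List Int)) : Prop := out = compress_s_alt l
instance (l : List (List Int)) (out : List (List Int)) : Decidable (Spec_compress_s l out) := by
  unfold Spec_compress_s; infer_instance

-- ===== CLAIM (what is proved, stated in full; the proofs are below) =====
def Claim_equal_compress_s : Prop :=
  ∀ (l : List (List Int)), Dom_compress_s l → Pre_compress_s l → Spec_compress_s l (compress_s l)

-- ===== LEMMAS AND PROOFS =====

-- the j-th column of a grid (definitionally the 'col' built in compress_s_alt)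
def colOf (g : List (List Int)) (j : Nat) : List Int := g.map (fun r => r.getD j 0)

-- spec-level column version of the zero-case body
def shiftC (c : List Int) (i : Nat) : List Int := c.take i ++ c.drop (i+1) ++ [0]

theorem length_shiftC (c : List Int) (i : Nat) (h : i < c.length) :
    (shiftC c i).length = c.length := by
  simp [shiftC]; omega

-- spec-level column version of the while loop
def whileC (c : List Int) (i s : Nat) : List Int :=
  if _h : i < c.length - s then
    if c.getD i 0 == 0 then whileC (shiftC c i) i (s+1) else whileC c (i+1) s
  else c
termination_by c.length - s - i
decreasing_by
  · rw [length_shiftC c i (by omega)]; omega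
  · omega

-- the compressed column: non-zeros first, zeros behind (grid is reversed at this point)
def compC (c : List Int) : List Int :=
  c.filter (fun x => x != 0) ++ List.replicate (c.length - (c.filter (fun x => x != 0)).length) 0

theorem list_eq_of_getD {α : Type} (d : α) (a b : List α) (hl : a.length = b.length)
    (h : ∀ k, k < a.length → a.getD k d = b.getD k d) : a = b := by
  apply List.ext_getElem hl
  intro k h1 h2
  have := h k h1
  rwa [List.getD_eq_getElem a d h1, List.getD_eq_getElem b d h2] at this

theorem getD_set {α : Type} (d : α) (g : List α) (i k : Nat) (r : α) :
    (g.set i r).getD k d = if k = i ∧ i < g.length then r else g.getD k d := by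
  by_cases h : k = i
  · subst h
    by_cases hi : k < g.length <;>
      simp [List.getD_eq_getElem?_getD, hi]
  · simp [List.getD_eq_getElem?_getD, List.getElem?_set_ne (fun he => h he.symm), h]

theorem gget_oob (g : List (List Int)) (k j : Nat) (h : g.length ≤ k) : gget g k j = 0 := by
  unfold gget
  rw [List.getD_eq_default _ _ h]
  rfl

theorem rowlen_sset (g : List (List Int)) (i j k : Nat) (v : Int) :
    ((sset g i j v).getD k []).length = (g.getD k []).length := by
  unfold sset
  rw [getD_set]
  split_ifs with h
  · obtain ⟨rfl, _⟩ := h; simp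
  · rfl

theorem gget_sset (g : List (List Int)) (i j k j' : Nat) (v : Int)
    (hrow : j < (g.getD i []).length) :
    gget (sset g i j v) k j' = if k = i ∧ i < g.length ∧ j' = j then v else gget g k j' := by
  unfold gget sset
  rw [getD_set]
  split_ifs with h1 h2 h3
  · obtain ⟨rfl, _⟩ := h1
    rw [getD_set, if_pos ⟨h2.2.2, hrow⟩]
  · obtain ⟨rfl, hlen⟩ := h1
    rw [getD_set, if_neg (fun hc => h2 ⟨rfl, hlen, hc.1⟩)]
  · exact absurd ⟨h3.1, h3.2.1⟩ h1
  · rfl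

theorem rowlen_foldl_sset (j : Nat) (ks : List Nat) (g : List (List Int)) (k : Nat) :
    (((ks.foldl (fun h k => sset h k j (gget h (k+1) j)) g)).getD k []).length
      = (g.getD k []).length := by
  induction ks generalizing g with
  | nil => rfl
  | cons a as ih => rw [List.foldl_cons, ih, rowlen_sset]

theorem gget_foldl_shift (j : Nat) (m : Nat) :
    ∀ (g : List (List Int)) (i : Nat),
      (∀ k, k < g.length → j < (g.getD k []).length) → i + m ≤ g.length →
      ∀ k j', gget ((List.range' i m).foldl (fun h k => sset h k j (gget h (k+1) j)) g) k j'
        = if i ≤ k ∧ k < i + m ∧ j' = j then gget g (k+1) j else gget g k j' := by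
  induction m with
  | zero =>
    intro g i _ _ k j'
    simp only [List.range'_zero, List.foldl_nil]
    split_ifs with h
    · omega
    · rfl
  | succ m ih =>
    intro g i hrows him k j'
    rw [List.range'_1_concat, List.foldl_append, List.foldl_cons, List.foldl_nil]
    have hlenF := length_foldl_sset j (List.range' i m) g
    have hrowF := rowlen_foldl_sset j (List.range' i m) g
    have hrow : j < (((List.range' i m).foldl (fun h k => sset h k j (gget h (k+1) j)) g).getD (i+m) []).length := by
      rw [hrowF]; exact hrows (i+m) (by omega)
    rw [gget_sset _ _ _ _ _ _ hrow]
    have hIH := ih g i hrows (by omega)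
    rw [hIH (i+m+1) j, hIH k j']
    have : ¬ (i ≤ i+m+1 ∧ i+m+1 < i + m ∧ j = j) := by omega
    rw [if_neg this]
    rw [hlenF]
    split_ifs <;> first | rfl | omega | (congr 1; omega)

theorem gget_shiftA (g : List (List Int)) (j i : Nat)
    (hrows : ∀ k, k < g.length → j < (g.getD k []).length) (hi : i < g.length) (k j' : Nat) :
    gget (shiftA g j i) k j' =
      if i ≤ k ∧ k + 1 = g.length ∧ j' = j then 0
      else if i ≤ k ∧ k + 1 < g.length ∧ j' = j then gget g (k+1) j
      else gget g k j' := by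
  unfold shiftA
  simp only []
  have hrow : j < (((List.range' i (g.length - 1 - i)).foldl (fun h k => sset h k j (gget h (k+1) j)) g).getD (g.length - 1) []).length := by
    rw [rowlen_foldl_sset]; exact hrows (g.length - 1) (by omega)
  rw [gget_sset _ _ _ _ _ _ hrow]
  rw [length_foldl_sset]
  have hc := gget_foldl_shift j (g.length - 1 - i) g i hrows (by omega)
  rw [hc k j']
  by_cases hb : k ≥ g.length
  · have h0 : gget g k j' = 0 := gget_oob g k j' hb
    split_ifs <;> omega
  · split_ifs <;> first | rfl | omega

theorem length_colOf (g : List (List Int)) (j : Nat) : (colOf g j).length = g.length := by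
  simp [colOf]

theorem getD_colOf (g : List (List Int)) (j k : Nat) : (colOf g j).getD k 0 = gget g k j := by
  unfold colOf gget
  simp only [List.getD_eq_getElem?_getD, List.getElem?_map]
  cases g[k]? <;> rfl

theorem getD_shiftC (c : List Int) (i : Nat) (hi : i < c.length) (k : Nat) :
    (shiftC c i).getD k 0 =
      if k < i then c.getD k 0
      else if k + 1 < c.length then c.getD (k+1) 0 else 0 := by
  unfold shiftC
  rw [List.append_assoc]
  have hlt : (c.take i).length = i := by simp; omega
  by_cases h1 : k < i
  · rw [List.getD_append _ _ _ k (by omega)]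
    rw [if_pos h1]
    simp [List.getD_eq_getElem?_getD, h1]
  · rw [List.getD_append_right _ _ _ k (by omega)]
    rw [if_neg h1, hlt]
    by_cases h2 : k + 1 < c.length
    · rw [List.getD_append _ _ _ _ (by simp; omega)]
      rw [if_pos h2]
      simp only [List.getD_eq_getElem?_getD, List.getElem?_drop]
      congr 2
      omega
    · rw [if_neg h2, List.getD_append_right _ _ _ _ (by simp; omega)]
      have hd : (c.drop (i+1)).length = c.length - (i+1) := by simp
      rcases Nat.lt_or_ge (k - i - (c.drop (i+1)).length) 1 with h | h
      · interval_cases hki : (k - i - (c.drop (i+1)).length)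
        rfl
      · rw [List.getD_eq_default _ _ (by simpa using h)]

theorem colOf_shiftA_self (g : List (List Int)) (j i : Nat)
    (hrows : ∀ k, k < g.length → j < (g.getD k []).length) (hi : i < g.length) :
    colOf (shiftA g j i) j = shiftC (colOf g j) i := by
  apply list_eq_of_getD 0
  · rw [length_colOf, length_shiftA, length_shiftC _ _ (by rw [length_colOf]; exact hi), length_colOf]
  · intro k _
    rw [getD_colOf, gget_shiftA g j i hrows hi, getD_shiftC _ _ (by rw [length_colOf]; exact hi)]
    rw [length_colOf, getD_colOf, getD_colOf]
    by_cases hb : g.length ≤ k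
    · rw [gget_oob g k j hb]
      split_ifs <;> first | rfl | omega
    · split_ifs <;> first | rfl | omega

theorem colOf_shiftA_other (g : List (List Int)) (j i j' : Nat)
    (hrows : ∀ k, k < g.length → j < (g.getD k []).length) (hi : i < g.length) (hne : j' ≠ j) :
    colOf (shiftA g j i) j' = colOf g j' := by
  apply list_eq_of_getD 0
  · rw [length_colOf, length_shiftA, length_colOf]
  · intro k _
    rw [getD_colOf, getD_colOf, gget_shiftA g j i hrows hi]
    split_ifs <;> first | rfl | omega

theorem rowlen_shiftA (g : List (List Int)) (j i k : Nat) :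
    ((shiftA g j i).getD k []).length = (g.getD k []).length := by
  unfold shiftA
  simp only []
  rw [rowlen_sset, rowlen_foldl_sset]

theorem whileA_sim (j : Nat) (N : Nat) :
    ∀ (g : List (List Int)) (i s : Nat),
      g.length - s - i ≤ N → (∀ k, k < g.length → j < (g.getD k []).length) →
      colOf (whileA j g i s) j = whileC (colOf g j) i s
      ∧ (∀ j', j' ≠ j → colOf (whileA j g i s) j' = colOf g j')
      ∧ (whileA j g i s).length = g.length
      ∧ (∀ k, ((whileA j g i s).getD k []).length = (g.getD k []).length) := by
  induction N with
  | zero =>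
    intro g i s hN _
    rw [whileA, whileC]
    rw [dif_neg (by omega), dif_neg (by rw [length_colOf]; omega)]
    exact ⟨rfl, fun _ _ => rfl, rfl, fun _ => rfl⟩
  | succ N ih =>
    intro g i s hN hrows
    rw [whileA, whileC]
    by_cases hcond : i < g.length - s
    · rw [dif_pos hcond, dif_pos (by rw [length_colOf]; omega)]
      rw [getD_colOf]
      by_cases hz : gget g i j == 0
      · rw [if_pos hz, if_pos hz]
        have hi : i < g.length := by omega
        have hrows' : ∀ k, k < (shiftA g j i).length → j < (((shiftA g j i).getD k []).length) := by
          intro k hk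
          rw [rowlen_shiftA]
          exact hrows k (by rwa [length_shiftA] at hk)
        obtain ⟨h1, h2, h3, h4⟩ := ih (shiftA g j i) i (s+1)
          (by rw [length_shiftA]; omega) hrows'
        refine ⟨?_, ?_, ?_, ?_⟩
        · rw [h1, colOf_shiftA_self g j i hrows hi]
        · intro j' hne
          rw [h2 j' hne, colOf_shiftA_other g j i j' hrows hi hne]
        · rw [h3, length_shiftA]
        · intro k
          rw [h4, rowlen_shiftA]
      · rw [if_neg hz, if_neg hz]
        exact ih g (i+1) s (by omega) hrows
    · rw [dif_neg hcond, dif_neg (by rw [length_colOf]; omega)]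
      exact ⟨rfl, fun _ _ => rfl, rfl, fun _ => rfl⟩

theorem drop_getD (c : List Int) (n k : Nat) : (c.drop n).getD k 0 = c.getD (n+k) 0 := by
  simp [List.getD_eq_getElem?_getD, List.getElem?_drop]

theorem compC_self (c : List Int) (i : Nat) (hi : i ≤ c.length)
    (hpre : ∀ k, k < i → c.getD k 0 ≠ 0)
    (hsuf : ∀ k, i ≤ k → k < c.length → c.getD k 0 = 0) :
    compC c = c := by
  have htake : c.filter (fun x => x != 0) = c.take i := by
    conv_lhs => rw [← List.take_append_drop i c]
    rw [List.filter_append]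
    have h1 : (c.take i).filter (fun x => x != 0) = c.take i := by
      apply List.filter_eq_self.mpr
      intro x hx
      obtain ⟨k, hk, hget⟩ := List.getElem_of_mem hx
      have hki : k < i := by simp at hk; omega
      rw [List.getElem_take] at hget
      have := hpre k hki
      rw [List.getD_eq_getElem c 0 (by simp at hk; omega)] at this
      simp [← hget, this]
    have h2 : (c.drop i).filter (fun x => x != 0) = [] := by
      apply List.filter_eq_nil_iff.mpr
      intro x hx
      obtain ⟨k, hk, hget⟩ := List.getElem_of_mem hx
      rw [List.getElem_drop] at hget
      have hkc : i + k < c.length := by simp at hk; omega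
      have := hsuf (i + k) (by omega) hkc
      rw [List.getD_eq_getElem c 0 hkc] at this
      simp [← hget, this]
    rw [h1, h2, List.append_nil]
  have hdrop : c.drop i = List.replicate (c.length - i) (0:Int) := by
    rw [List.eq_replicate_iff]
    constructor
    · simp
    · intro x hx
      obtain ⟨k, hk, hget⟩ := List.getElem_of_mem hx
      rw [List.getElem_drop] at hget
      have hkc : i + k < c.length := by simp at hk; omega
      have := hsuf (i + k) (by omega) hkc
      rw [List.getD_eq_getElem c 0 hkc] at this
      rw [← hget, this]
  unfold compC
  rw [htake]
  have hlt : (c.take i).length = i := by simp; omega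
  rw [hlt, ← hdrop, List.take_append_drop]

theorem whileC_closed (N : Nat) :
    ∀ (c : List Int) (i s : Nat),
      c.length - s - i ≤ N → i ≤ c.length - s → s ≤ c.length →
      (∀ k, k < i → c.getD k 0 ≠ 0) →
      (∀ k, c.length - s ≤ k → k < c.length → c.getD k 0 = 0) →
      whileC c i s = compC c := by
  induction N with
  | zero =>
    intro c i s hN hi hs hpre hsuf
    rw [whileC, dif_neg (by omega)]
    rw [compC_self c i (by omega) hpre (fun k h1 h2 => hsuf k (by omega) h2)]
  | succ N ih =>
    intro c i s hN hi hs hpre hsuf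
    rw [whileC]
    by_cases hcond : i < c.length - s
    · rw [dif_pos hcond]
      have hic : i < c.length := by omega
      by_cases hz : c.getD i 0 == 0
      · rw [if_pos hz]
        have hz' : c.getD i 0 = 0 := by simpa using hz
        have hlen : (shiftC c i).length = c.length := length_shiftC c i hic
        have hfil : (shiftC c i).filter (fun x => x != 0) = c.filter (fun x => x != 0) := by
          unfold shiftC
          conv_rhs => rw [← List.take_append_drop i c]
          rw [List.drop_eq_getElem_cons hic, ← List.getD_eq_getElem c 0 hic, hz']
          simp [List.filter_append]
        have := ih (shiftC c i) i (s+1) (by omega) (by omega) (by omega)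
          (fun k hk => by rw [getD_shiftC c i hic, if_pos hk]; exact hpre k hk)
          (by
            intro k h1 h2
            rw [getD_shiftC c i hic]
            rw [hlen] at h1 h2
            rw [if_neg (by omega)]
            split_ifs with h3
            · exact hsuf (k+1) (by omega) h3
            · rfl)
        rw [this]
        unfold compC
        rw [hfil, hlen]
      · rw [if_neg hz]
        have hz' : c.getD i 0 ≠ 0 := by simpa using hz
        exact ih c (i+1) s (by omega) (by omega) hs
          (fun k hk => by rcases Nat.lt_or_ge k i with h | h
                          · exact hpre k h
                          · have : k = i := by omega
                            subst this; exact hz')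
          hsuf
    · rw [dif_neg hcond]
      rw [compC_self c i (by omega) hpre (fun k h1 h2 => hsuf k (by omega) h2)]

theorem getD_reverse {α : Type} (d : α) (x : List α) (i : Nat) (h : i < x.length) :
    x.reverse.getD i d = x.getD (x.length - 1 - i) d := by
  rw [List.getD_eq_getElem _ d (by simpa using h),
      List.getD_eq_getElem _ d (by omega), List.getElem_reverse]

theorem compC_reverse (c : List Int) :
    compC c.reverse =
      (List.replicate (c.length - (c.filter (fun x => x != 0)).length) 0
        ++ c.filter (fun x => x != 0)).reverse := by
  unfold compC
  rw [List.filter_reverse]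
  simp [List.reverse_append]

theorem colOf_reverse (l : List (List Int)) (j : Nat) :
    colOf l.reverse j = (colOf l j).reverse := by
  simp [colOf]

theorem mem_getD_of_lt (l : List (List Int)) (k : Nat) (h : k < l.length) :
    l.getD k [] ∈ l := by
  rw [List.getD_eq_getElem l [] h]
  exact List.getElem_mem h

theorem fold_cols (l : List (List Int)) (hpre : ∀ row ∈ l, l.length ≤ row.length) :
    ∀ m, m ≤ l.length →
      ((List.range m).foldl (fun g j => whileA j g 0 0) l.reverse).length = l.length
      ∧ (∀ k, (((List.range m).foldl (fun g j => whileA j g 0 0) l.reverse).getD k []).length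
              = (l.reverse.getD k []).length)
      ∧ (∀ j, j < m → colOf ((List.range m).foldl (fun g j => whileA j g 0 0) l.reverse) j
              = compC (colOf l.reverse j))
      ∧ (∀ j, m ≤ j → colOf ((List.range m).foldl (fun g j => whileA j g 0 0) l.reverse) j
              = colOf l.reverse j) := by
  intro m
  induction m with
  | zero =>
    intro _
    refine ⟨by simp, fun _ => by simp, fun j hj => absurd hj (by omega), fun _ _ => by simp⟩
  | succ m ih =>
    intro hm
    obtain ⟨h1, h2, h3, h4⟩ := ih (by omega)
    rw [List.range_succ, List.foldl_append, List.foldl_cons, List.foldl_nil]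
    set G := (List.range m).foldl (fun g j => whileA j g 0 0) l.reverse with hG
    have hrows : ∀ k, k < G.length → m < ((G.getD k []).length) := by
      intro k hk
      rw [h2 k]
      have hkn : k < l.reverse.length := by rw [List.length_reverse]; omega
      have hmem : l.reverse.getD k [] ∈ l := by
        rw [← List.mem_reverse]
        exact mem_getD_of_lt l.reverse k hkn
      have := hpre _ hmem
      omega
    obtain ⟨w1, w2, w3, w4⟩ := whileA_sim m G.length G 0 0 (by omega) hrows
    have hcomp : whileC (colOf G m) 0 0 = compC (colOf G m) := by
      apply whileC_closed (colOf G m).length _ 0 0 (by omega) (by omega) (by omega)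
      · intro k hk; omega
      · intro k hk1 hk2; omega
    refine ⟨by rw [w3, h1], fun k => by rw [w4 k, h2 k], ?_, ?_⟩
    · intro j hj
      rcases Nat.lt_or_ge j m with h | h
      · rw [w2 j (by omega), h3 j h]
      · have hjm : j = m := by omega
        subst hjm
        rw [w1, hcomp, h4 j (le_refl j)]
    · intro j hj
      rw [w2 j (by omega), h4 j (by omega)]

theorem compress_s_spec : Claim_equal_compress_s := by
  intro l _hdom hpre
  unfold Spec_compress_s
  simp only [compress_s, compress_s_alt, List.length_reverse]
  obtain ⟨hG1, hG2, hG3, hG4⟩ := fold_cols l hpre l.length (le_refl _)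
  set n := l.length with hn
  set G := (List.range n).foldl (fun g j => whileA j g 0 0) l.reverse with hGdef
  apply list_eq_of_getD ([] : List Int)
  · simp [hG1]
  · intro i hi
    have hin : i < n := by rw [List.length_reverse, hG1] at hi; exact hi
    -- left side: row n-1-i of G
    rw [getD_reverse [] G i (by rw [hG1]; exact hin), hG1]
    -- right side: the i-th generated row
    conv_rhs => rw [List.getD_eq_getElem _ [] (by simpa using hin)]
    rw [List.getElem_map, List.getElem_range]
    have hrowrev : l.reverse.getD (n - 1 - i) [] = l.getD i [] := by
      rw [getD_reverse [] l (n - 1 - i) (by omega)]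
      congr 1
      omega
    have hilen : n ≤ (l.getD i []).length := hpre _ (mem_getD_of_lt l i hin)
    apply list_eq_of_getD (0 : Int)
    · rw [hG2, hrowrev]
      simp only [List.length_append, List.length_map, List.length_range, List.length_drop]
      omega
    · intro k hk
      have hklen : k < (l.getD i []).length := by rw [hG2, hrowrev] at hk; exact hk
      have hLHS : (G.getD (n - 1 - i) []).getD k 0 = (colOf G k).getD (n - 1 - i) 0 := by
        rw [getD_colOf]
        rfl
      rw [hLHS]
      rcases Nat.lt_or_ge k n with hkn | hkn
      · -- compressed column k
        rw [hG3 k hkn, colOf_reverse, compC_reverse (colOf l k)]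
        have hfl : ((colOf l k).filter (fun x => x != 0)).length ≤ n := by
          have := List.length_filter_le (fun x => x != 0) (colOf l k)
          rw [length_colOf] at this
          exact this
        have hXlen : (List.replicate ((colOf l k).length - ((colOf l k).filter (fun x => x != 0)).length) (0:Int)
            ++ (colOf l k).filter (fun x => x != 0)).length = n := by
          rw [List.length_append, List.length_replicate, length_colOf]
          omega
        rw [getD_reverse 0 _ (n - 1 - i) (by rw [hXlen]; omega), hXlen]
        have hidx : n - 1 - (n - 1 - i) = i := by omega
        rw [hidx]
        -- right side: entry k of the map over cols, then entry i of column k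
        conv_rhs => rw [List.getD_append _ _ _ k (by simpa using hkn)]
        conv_rhs => rw [List.getD_eq_getElem _ 0 (by simpa using hkn)]
        conv_rhs => rw [List.getElem_map, List.getElem_map, List.getElem_range]
        rw [length_colOf, ← hn]
        simp only [colOf]
      · -- untouched tail of the row
        rw [hG4 k (by omega), colOf_reverse, getD_reverse 0 _ (n - 1 - i) (by rw [length_colOf]; omega),
            length_colOf]
        have hidx : n - 1 - (n - 1 - i) = i := by omega
        rw [hidx, getD_colOf]
        conv_rhs => rw [List.getD_append_right _ _ _ k (by simpa using hkn)]
        rw [drop_getD]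
        simp only [List.length_map, List.length_range]
        have : n + (k - n) = k := by omega
        rw [this]
        rfl
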